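-- pv_equiv track=rewrite | github.com/Giovanni0114/gerrit_changes_dashboard | input_handler.py | parse_idx_notation
-- ===== SOURCE A (Python) =====
-- def parse_idx_notation(raw: str, max_idx: int) -> list[int] | None:
--     """Parse advanced index notation into a sorted list of unique 1-based indexes.
--
--     Supported formats:
--     - Single index: ``"3"``
--     - Comma-separated: ``"3,2,4"``
--     - Range: ``"3-8"`` (inclusive on both ends)
--     - Combined: ``"1-2, 3-5, 11, 23"``
--
--     Whitespace is ignored. Returns ``None`` when the expression is invalid or any
--     index falls outside ``[1, max_idx]``.
--     """
--     if not raw or not raw.strip():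
--         return None
--
--     stripped = raw.replace(" ", "")
--     if not stripped:
--         return None
--
--     result: set[int] = set()
--     for part in stripped.split(","):
--         if not part:
--             return None  # empty segment, e.g. "1,,3"
--         if "-" in part:
--             pieces = part.split("-")
--             if len(pieces) != 2 or not pieces[0] or not pieces[1]:
--                 return None
--             if not pieces[0].isnumeric() or not pieces[1].isnumeric():
--                 return None
--             lo, hi = int(pieces[0]), int(pieces[1])
--             if lo > hi:
--                 return None
--             if lo < 1 or hi > max_idx:
--                 return None
--             result.update(range(lo, hi + 1))
--         else:
--             if not part.isnumeric():
--                 return None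
--             val = int(part)
--             if val < 1 or val > max_idx:
--                 return None
--             result.add(val)
--
--     return sorted(result) if result else None
-- ===== SOURCE B (Python) =====
-- def parse_idx_notation(raw: str, max_idx: int) -> list[int] | None:
--     """Interval reimplementation: each comma part is parsed by a single left-to-right
--     character scan into a (lo, hi) interval; validated intervals are sorted by lower
--     bound and the covered indices emitted in one merge sweep."""
--     if not raw.strip():
--         return None
--
--     intervals: list[tuple[int, int]] = []
--     for part in raw.replace(" ", "").split(","):
--         bounds = _scan_part(part)
--         if bounds is None:
--             return None
--         lo, hi = bounds
--         if lo > hi or lo < 1 or hi > max_idx: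
--             return None
--         intervals.append((lo, hi))
--
--     intervals.sort(key=lambda iv: iv[0])
--     out: list[int] = []
--     cur_hi = 0
--     for lo, hi in intervals:
--         out.extend(range(max(lo, cur_hi + 1), hi + 1))
--         cur_hi = max(cur_hi, hi)
--     return out if out else None
--
--
-- def _scan_part(part: str) -> tuple[int, int] | None:
--     """One pass over the characters: digits accumulate a value; a single '-' (with
--     digits before and after) separates lo from hi; anything else is invalid."""
--     lo = None   # value seen before the '-', once the '-' has been consumed
--     acc = None  # value of the digit run currently being read (None = none yet)
--     for ch in part:
--         if "0" <= ch <= "9":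
--             acc = (0 if acc is None else acc) * 10 + (ord(ch) - 48)
--         elif ch == "-" and lo is None and acc is not None:
--             lo, acc = acc, None
--         else:
--             return None
--     if acc is None:
--         return None
--     return (acc, acc) if lo is None else (lo, acc)
-- ===== Notes on version B (the rewrite author's own statement) =====
-- stated objective: alternative
-- what changed: B parses each comma part with a single left-to-right character scan (digit runs plus at most one interior '-') instead of split('-') + isnumeric + int, collects validated (lo,hi) intervals, sorts them by lower bound and emits the covered indices with one merge sweep instead of accumulating every index in a set and sorting the set.
import Mathlib
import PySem

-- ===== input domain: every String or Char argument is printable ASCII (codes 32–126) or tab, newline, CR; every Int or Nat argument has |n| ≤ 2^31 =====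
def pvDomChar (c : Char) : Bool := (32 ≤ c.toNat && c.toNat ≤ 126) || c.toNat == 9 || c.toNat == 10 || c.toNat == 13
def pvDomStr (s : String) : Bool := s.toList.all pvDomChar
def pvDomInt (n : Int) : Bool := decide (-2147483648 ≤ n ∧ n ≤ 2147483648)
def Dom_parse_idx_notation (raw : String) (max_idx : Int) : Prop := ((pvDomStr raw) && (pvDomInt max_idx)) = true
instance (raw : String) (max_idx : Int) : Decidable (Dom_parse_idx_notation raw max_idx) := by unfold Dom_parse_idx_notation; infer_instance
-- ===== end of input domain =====

-- B parses each comma part with a single character scan (instead of split("-") + isnumeric + int),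
-- collects validated (lo,hi) intervals, sorts them by lower bound and emits the covered indices in
-- one merge sweep instead of accumulating every index in a set and sorting (objective: alternative).


-- ===== PORT A =====
-- one iteration of A's 'for part in stripped.split(",")' body: none = 'return None'
def pyA_part (max_idx : Int) (S : PySem.Set Int) (part : List Char) : Option (PySem.Set Int) :=
  if part = [] then none
  else if PySem.Chars.isIn ['-'] part then
    if (PySem.Chars.splitOn part ['-']).length ≠ 2 ∨ (PySem.Chars.splitOn part ['-']).getD 0 [] = []
        ∨ (PySem.Chars.splitOn part ['-']).getD 1 [] = [] then none
    else if ¬ (PySem.Chars.strIsdigit ((PySem.Chars.splitOn part ['-']).getD 0 [])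
        ∧ PySem.Chars.strIsdigit ((PySem.Chars.splitOn part ['-']).getD 1 [])) then none
    else
      match PySem.Int.ofChars? ((PySem.Chars.splitOn part ['-']).getD 0 []),
            PySem.Int.ofChars? ((PySem.Chars.splitOn part ['-']).getD 1 []) with
      | some lo, some hi =>
        if lo > hi then none
        else if lo < 1 ∨ hi > max_idx then none
        else some (PySem.Set.update S (PySem.List.pyRange lo (hi + 1) 1))
      | _, _ => none    -- unreachable: int() guarded by isnumeric
  else
    if ¬ PySem.Chars.strIsdigit part then none
    else
      match PySem.Int.ofChars? part with
      | some v =>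
        if v < 1 ∨ v > max_idx then none
        else some (PySem.Set.add S v)
      | none => none    -- unreachable: int() guarded by isnumeric

def pyA_loop (max_idx : Int) : List (List Char) → PySem.Set Int → Option (PySem.Set Int)
  | [], S => some S
  | p :: rest, S =>
    match pyA_part max_idx S p with
    | none => none
    | some S' => pyA_loop max_idx rest S'

def parse_idx_notation (raw : String) (max_idx : Int) : Option (List Int) :=
  if raw.toList = [] ∨ PySem.Chars.strip raw.toList = [] then none
  else if PySem.Chars.replace raw.toList [' '] [] = [] then none
  else
    match pyA_loop max_idx (PySem.Chars.splitOn (PySem.Chars.replace raw.toList [' '] []) [',']) PySem.Set.empty with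
    | none => none
    | some result => if result = [] then none else some (PySem.List.sorted result (fun x => x) false)

-- ===== PORT B =====
-- B's _scan_part loop: state = (lo = digit run seen before '-', ds = current digit run); none = invalid
def pyB_scan : List Char → Option (List Char) → List Char → Option (Option (List Char) × List Char)
  | [], lo, ds => if ds = [] then none else some (lo, ds)
  | c :: rest, lo, ds =>
    if '0' ≤ c ∧ c ≤ '9' then pyB_scan rest lo (ds ++ [c])
    else if c = '-' ∧ lo = none ∧ ds ≠ [] then pyB_scan rest (some ds) []
    else none

-- B's _scan_part: the final int() conversions on the collected digit runs
def pyB_scanPart (part : List Char) : Option (Int × Int) :=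
  match pyB_scan part none [] with
  | none => none
  | some (none, ds) =>
    match PySem.Int.ofChars? ds with
    | some v => some (v, v)
    | none => none    -- unreachable: ds is a nonempty digit run
  | some (some l, ds) =>
    match PySem.Int.ofChars? l, PySem.Int.ofChars? ds with
    | some lo, some hi => some (lo, hi)
    | _, _ => none    -- unreachable: l, ds are nonempty digit runs

-- one iteration of B's main loop: the validated interval of one part, none = 'return None'
def pyB_part (max_idx : Int) (part : List Char) : Option (Int × Int) :=
  match pyB_scanPart part with
  | none => none
  | some (lo, hi) =>
    if lo > hi ∨ lo < 1 ∨ hi > max_idx then none else some (lo, hi)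

def pyB_collect (max_idx : Int) : List (List Char) → List (Int × Int) → Option (List (Int × Int))
  | [], acc => some acc
  | p :: rest, acc =>
    match pyB_part max_idx p with
    | none => none
    | some iv => pyB_collect max_idx rest (acc ++ [iv])

-- B's sweep loop over the sorted intervals; state = (out, cur_hi)
def pyB_sweep (ivs : List (Int × Int)) : List Int × Int :=
  ivs.foldl (fun st iv => (st.1 ++ PySem.List.pyRange (max iv.1 (st.2 + 1)) (iv.2 + 1) 1, max st.2 iv.2)) ([], 0)

def parse_idx_notation_alt (raw : String) (max_idx : Int) : Option (List Int) :=
  if PySem.Chars.strip raw.toList = [] then none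
  else
    match pyB_collect max_idx (PySem.Chars.splitOn (PySem.Chars.replace raw.toList [' '] []) [',']) [] with
    | none => none
    | some intervals =>
      if (pyB_sweep (PySem.List.sorted intervals (fun iv => iv.1) false)).1 = [] then none
      else some (pyB_sweep (PySem.List.sorted intervals (fun iv => iv.1) false)).1

-- ===== PRECONDITION & SPEC =====
def Spec_parse_idx_notation (raw : String) (max_idx : Int) (out : Option (List Int)) : Prop := out = parse_idx_notation_alt raw max_idx
instance (raw : String) (max_idx : Int) (out : Option (List Int)) : Decidable (Spec_parse_idx_notation raw max_idx out) := by unfold Spec_parse_idx_notation; infer_instance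

-- ===== CLAIM (what is proved, stated in full; the proofs are below) =====
def Claim_equal_parse_idx_notation : Prop := ∀ (raw : String) (max_idx : Int), Dom_parse_idx_notation raw max_idx → Spec_parse_idx_notation raw max_idx (parse_idx_notation raw max_idx)

-- ===== LEMMAS AND PROOFS =====

-- scanning a run of digits appends it to the current digit run
theorem scan_digits (pre : List Char) (hd : ∀ c ∈ pre, PySem.Chars.isdigit c = true) :
    ∀ (rest : List Char) (lo : Option (List Char)) (ds : List Char),
    pyB_scan (pre ++ rest) lo ds = pyB_scan rest lo (ds ++ pre) := by
  induction pre with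
  | nil => simp
  | cons c pre' ih =>
    intro rest lo ds
    have hc := hd c (List.mem_cons_self)
    simp only [PySem.Chars.isdigit, Bool.and_eq_true, decide_eq_true_eq] at hc
    simp only [List.cons_append, pyB_scan, if_pos hc]
    rw [ih (fun x hx => hd x (List.mem_cons_of_mem _ hx)) rest lo (ds ++ [c])]
    simp

-- splitOn.go prepends the accumulator
theorem go_acc (l : List Char) : ∀ (f : Nat) (cur : List Char) (acc : List (List Char)),
    l.length ≤ f →
    PySem.Chars.splitOn.go ['-'] f l cur acc = acc.reverse ++ PySem.Chars.splitOn.go ['-'] f l cur [] := by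
  induction l with
  | nil =>
    intro f cur acc _
    rw [PySem.Chars.splitOn.go.eq_def]
    conv_rhs => rw [PySem.Chars.splitOn.go.eq_def]
    cases f <;> simp
  | cons c rest ih =>
    intro f cur acc h
    simp only [List.length_cons] at h
    obtain ⟨g, rfl⟩ : ∃ g, f = g + 1 := ⟨f - 1, by omega⟩
    rw [PySem.Chars.splitOn.go.eq_def]
    conv_rhs => rw [PySem.Chars.splitOn.go.eq_def]
    simp only [List.length_singleton, List.drop_succ_cons, List.drop_zero]
    split_ifs with hp
    · rw [ih g [] (cur.reverse :: acc) (by omega), ih g [] ([cur.reverse]) (by omega)]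
      simp
    · exact ih g (c :: cur) acc (by omega)

-- splitting a '-'-free string gives the string itself
theorem go_no_dash (l : List Char) : ∀ (f : Nat) (cur : List Char) (acc : List (List Char)),
    '-' ∉ l → l.length ≤ f →
    PySem.Chars.splitOn.go ['-'] f l cur acc = ((cur.reverse ++ l) :: acc).reverse := by
  induction l with
  | nil =>
    intro f cur acc _ _
    rw [PySem.Chars.splitOn.go.eq_def]
    cases f <;> simp
  | cons c rest ih =>
    intro f cur acc hnd h
    simp only [List.length_cons] at h
    obtain ⟨g, rfl⟩ : ∃ g, f = g + 1 := ⟨f - 1, by omega⟩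
    have hc : c ≠ '-' := fun he => hnd (he ▸ List.mem_cons_self)
    rw [PySem.Chars.splitOn.go.eq_def]
    simp only [List.isPrefixOf, List.isPrefixOf_nil_left, Bool.and_true, beq_iff_eq]
    rw [if_neg (by simpa using fun he => hc he.symm)]
    rw [ih g (c :: cur) acc (fun hm => hnd (List.mem_cons_of_mem _ hm)) (by omega)]
    simp

theorem splitOn_no_dash (s : List Char) (h : '-' ∉ s) : PySem.Chars.splitOn s ['-'] = [s] := by
  rw [PySem.Chars.splitOn, go_no_dash s (s.length + 1) [] [] h (by omega)]
  simp

-- splitting at the first '-' peels off the prefix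
theorem splitOn_dash (P suf : List Char) (h : '-' ∉ P) :
    PySem.Chars.splitOn (P ++ '-' :: suf) ['-'] = P :: PySem.Chars.splitOn suf ['-'] := by
  have key : ∀ (Q : List Char) (f : Nat) (cur : List Char) (acc : List (List Char)),
      '-' ∉ Q → Q.length + 1 + suf.length ≤ f →
      PySem.Chars.splitOn.go ['-'] f (Q ++ '-' :: suf) cur acc
        = PySem.Chars.splitOn.go ['-'] (f - Q.length - 1) suf [] ((cur.reverse ++ Q) :: acc) := by
    intro Q
    induction Q with
    | nil =>
      intro f cur acc _ h
      simp only [List.length_nil, Nat.add_zero] at h ⊢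
      obtain ⟨g, rfl⟩ : ∃ g, f = g + 1 := ⟨f - 1, by omega⟩
      rw [PySem.Chars.splitOn.go.eq_def]
      simp only [List.nil_append, List.isPrefixOf, beq_self_eq_true, List.isPrefixOf_nil_left,
        Bool.and_true, Bool.true_and, if_true, List.length_singleton, List.drop_succ_cons,
        List.drop_zero, List.reverse_nil, List.append_nil]
      have : g + 1 - 0 - 1 = g := by omega
      rw [this]
    | cons c Q' ih =>
      intro f cur acc hnd h
      simp only [List.length_cons] at h
      obtain ⟨g, rfl⟩ : ∃ g, f = g + 1 := ⟨f - 1, by omega⟩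
      have hc : c ≠ '-' := fun he => hnd (he ▸ List.mem_cons_self)
      rw [List.cons_append, PySem.Chars.splitOn.go.eq_def]
      simp only [List.isPrefixOf, List.isPrefixOf_nil_left, Bool.and_true, beq_iff_eq]
      rw [if_neg (by simpa using fun he => hc he.symm)]
      rw [ih g (c :: cur) acc (fun hm => hnd (List.mem_cons_of_mem _ hm)) (by omega)]
      have h2 : g + 1 - (c :: Q').length - 1 = g - Q'.length - 1 := by simp
      rw [h2]
      simp
  rw [PySem.Chars.splitOn, key P _ [] [] h (by simp only [List.length_append, List.length_cons]; omega)]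
  have hf : (P ++ '-' :: suf).length + 1 - P.length - 1 = suf.length + 1 := by
    simp [List.length_append]
    omega
  rw [hf]
  simp only [List.reverse_nil, List.nil_append]
  rw [go_acc suf (suf.length + 1) [] [P] (by omega)]
  simp [PySem.Chars.splitOn]

theorem splitOn_ne_nil (s : List Char) : PySem.Chars.splitOn s ['-'] ≠ [] := by
  have key : ∀ (f : Nat) (l cur : List Char) (acc : List (List Char)),
      PySem.Chars.splitOn.go ['-'] f l cur acc ≠ [] := by
    intro f
    induction f with
    | zero => intro l cur acc; rw [PySem.Chars.splitOn.go.eq_def]; simp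
    | succ g ih =>
      intro l cur acc
      rw [PySem.Chars.splitOn.go.eq_def]
      cases l with
      | nil => simp
      | cons c rest =>
        simp only [List.length_singleton, List.drop_succ_cons, List.drop_zero]
        split_ifs <;> exact ih _ _ _
  exact key _ _ _ _

-- replacing single spaces by nothing is filtering them out
theorem replace_space (s : List Char) : PySem.Chars.replace s [' '] [] = s.filter (fun c => c ≠ ' ') := by
  have key : ∀ (l : List Char) (f : Nat) (acc : List Char), l.length ≤ f →
      PySem.Chars.replace.go [' '] [] f l acc = acc.reverse ++ l.filter (fun c => c ≠ ' ') := by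
    intro l
    induction l with
    | nil =>
      intro f acc _
      rw [PySem.Chars.replace.go.eq_def]
      cases f <;> simp
    | cons c rest ih =>
      intro f acc h
      simp only [List.length_cons] at h
      obtain ⟨g, rfl⟩ : ∃ g, f = g + 1 := ⟨f - 1, by omega⟩
      rw [PySem.Chars.replace.go.eq_def]
      simp only [List.isPrefixOf, List.isPrefixOf_nil_left, Bool.and_true, beq_iff_eq,
        List.length_singleton, List.drop_succ_cons, List.drop_zero, List.reverse_nil,
        List.nil_append]
      by_cases hc : ' ' = c
      · rw [if_pos hc, ih g acc (by omega)]
        simp [List.filter_cons, ← hc]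
      · rw [if_neg hc, ih g (c :: acc) (by omega)]
        simp only [List.filter_cons]
        have hnc : (decide ¬c = ' ') = true := by simpa using fun he => hc he.symm
        rw [hnc]
        simp
  rw [PySem.Chars.replace]
  simp only [List.isEmpty_cons, if_neg]
  exact key s s.length [] (by omega)

-- a string with nonempty strip has a non-space character, so its space-filter is nonempty
theorem filter_ne_nil_of_strip (s : List Char) (h : PySem.Chars.strip s ≠ []) :
    s.filter (fun c => c ≠ ' ') ≠ [] := by
  have hl : PySem.Chars.lstrip s ≠ [] := by
    intro he
    apply h
    rw [PySem.Chars.strip, he]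
    rfl
  rcases hd : List.dropWhile PySem.Chars.isspace s with _ | ⟨c, t⟩
  · exact absurd hd (by rw [← PySem.Chars.lstrip]; exact hl)
  · have hcs : PySem.Chars.isspace c = false := by
      have w : s.dropWhile PySem.Chars.isspace ≠ [] := by rw [hd]; simp
      have := List.head_dropWhile_not PySem.Chars.isspace w
      simp only [hd, List.head_cons] at this
      exact this
    have hcmem : c ∈ s := (List.dropWhile_sublist _).subset (hd ▸ List.mem_cons_self)
    have hcne : c ≠ ' ' := fun he => by rw [he] at hcs; exact absurd hcs (by decide)
    exact List.ne_nil_of_mem (List.mem_filter.2 ⟨hcmem, by simpa using hcne⟩)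

-- small bridges between A's built-in tests and B's character conditions
theorem isIn_dash_true (part : List Char) (h : '-' ∈ part) : PySem.Chars.isIn ['-'] part = true :=
  (PySem.Chars.isIn_iff_infix _ _).2 ((List.singleton_infix_iff _ _).2 h)

theorem isIn_dash_false (part : List Char) (h : '-' ∉ part) : PySem.Chars.isIn ['-'] part = false :=
  (PySem.Chars.isIn_eq_false_iff _ _).2 (fun hin => h ((List.singleton_infix_iff _ _).1 hin))

theorem strIsdigit_true (s : List Char) (h1 : s ≠ []) (h2 : ∀ c ∈ s, PySem.Chars.isdigit c = true) :
    PySem.Chars.strIsdigit s = true := by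
  simp only [PySem.Chars.strIsdigit, Bool.and_eq_true, Bool.not_eq_eq_eq_not, Bool.not_true,
    List.isEmpty_eq_false_iff, List.all_eq_true]
  exact ⟨h1, h2⟩

theorem strIsdigit_false (s : List Char) (c : Char) (hc : c ∈ s) (hd : PySem.Chars.isdigit c = false) :
    PySem.Chars.strIsdigit s = false := by
  simp only [PySem.Chars.strIsdigit, Bool.and_eq_false_iff, List.all_eq_false]
  exact Or.inr ⟨c, hc, by simp [hd]⟩

theorem isdigit_false_cond (c : Char) (h : PySem.Chars.isdigit c = false) : ¬('0' ≤ c ∧ c ≤ '9') := by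
  simp only [PySem.Chars.isdigit, Bool.and_eq_false_iff, decide_eq_false_iff_not] at h
  tauto

-- splitting a list at its first '-'
theorem first_dash_split (l : List Char) (h : '-' ∈ l) :
    ∃ Q R, l = Q ++ '-' :: R ∧ '-' ∉ Q := by
  refine ⟨l.takeWhile (fun x => decide (x ≠ '-')), (l.dropWhile (fun x => decide (x ≠ '-'))).tail, ?_, ?_⟩
  · have hne : l.dropWhile (fun x => decide (x ≠ '-')) ≠ [] := by
      intro he
      rw [List.dropWhile_eq_nil_iff] at he
      have := he '-' h
      simp at this
    rcases hd : l.dropWhile (fun x => decide (x ≠ '-')) with _ | ⟨c, t⟩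
    · exact absurd hd hne
    · have hc : (fun x => decide (x ≠ '-')) c = false := by
        have := List.head_dropWhile_not (fun x => decide (x ≠ '-')) hne
        simp only [hd, List.head_cons] at this
        exact this
      have hc' : c = '-' := by simpa using hc
      conv_lhs => rw [← List.takeWhile_append_dropWhile (p := fun x => decide (x ≠ '-')) (l := l)]
      rw [hd, hc']
      simp
  · intro hm
    have := List.mem_takeWhile_imp hm
    simp at this

-- A's per-part step is B's per-part step followed by marking the interval in the set
theorem partAB (max_idx : Int) (S : PySem.Set Int) (part : List Char) :
    pyA_part max_idx S part
      = (pyB_part max_idx part).map (fun iv => PySem.Set.update S (PySem.List.pyRange iv.1 (iv.2 + 1) 1)) := by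
  have hsplit : part.takeWhile PySem.Chars.isdigit ++ part.dropWhile PySem.Chars.isdigit = part :=
    List.takeWhile_append_dropWhile
  have hpredig : ∀ c ∈ part.takeWhile PySem.Chars.isdigit, PySem.Chars.isdigit c = true :=
    fun c hc => List.mem_takeWhile_imp hc
  rcases hrest : part.dropWhile PySem.Chars.isdigit with _ | ⟨c, rest'⟩
  · -- no non-digit character: part is all digits
    rw [hrest, List.append_nil] at hsplit
    have hall : ∀ c ∈ part, PySem.Chars.isdigit c = true :=
      fun c hc => hpredig c (by rw [hsplit]; exact hc)
    by_cases hpe : part = []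
    · subst hpe
      simp [pyA_part, pyB_part, pyB_scanPart, pyB_scan]
    · have hnd : '-' ∉ part := fun hm => absurd (hall '-' hm) (by decide)
      have hB : pyB_scan part none [] = some (none, part) := by
        have h1 := scan_digits part hall [] none []
        rw [List.append_nil] at h1
        rw [h1]
        simp [pyB_scan, hpe]
      unfold pyA_part pyB_part pyB_scanPart
      rw [hB, if_neg hpe, if_neg (by simp [isIn_dash_false part hnd]),
        if_neg (by simp [strIsdigit_true part hpe hall])]
      rcases hoc : PySem.Int.ofChars? part with _ | v
      · simp [hoc]
      · simp only [hoc]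
        by_cases h1 : v < 1 ∨ v > max_idx
        · rw [if_pos h1, if_pos (show v > v ∨ v < 1 ∨ v > max_idx by omega)]
          rfl
        · rw [if_neg h1, if_neg (show ¬(v > v ∨ v < 1 ∨ v > max_idx) by omega)]
          simp only [Option.map_some, PySem.List.pyRange_one_singleton]
          rfl
  · -- part = pre ++ c :: rest' with pre all digits and c not a digit
    have hpart : part = part.takeWhile PySem.Chars.isdigit ++ c :: rest' := by
      conv_lhs => rw [← hsplit]
      rw [hrest]
    set pre := part.takeWhile PySem.Chars.isdigit with hpre
    have hcd : PySem.Chars.isdigit c = false := by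
      have w : part.dropWhile PySem.Chars.isdigit ≠ [] := by rw [hrest]; simp
      have := List.head_dropWhile_not PySem.Chars.isdigit w
      simp only [hrest, List.head_cons] at this
      exact this
    have hpe : part ≠ [] := by rw [hpart]; simp
    have hcond : ¬('0' ≤ c ∧ c ≤ '9') := isdigit_false_cond c hcd
    have hnd_pre : '-' ∉ pre := fun hm => absurd (hpredig '-' hm) (by decide)
    have hscan : pyB_scan part none [] = pyB_scan (c :: rest') none pre := by
      conv_lhs => rw [hpart]
      rw [scan_digits pre hpredig (c :: rest') none []]
      simp
    by_cases hc : c = '-'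
    · subst hc
      by_cases hp0 : pre = []
      · -- part = '-' :: rest'
        have hB : pyB_scan part none [] = none := by
          rw [hscan, hp0]
          simp only [pyB_scan]
          rw [if_neg (by decide), if_neg (by simp)]
        have hsp : PySem.Chars.splitOn part ['-'] = [] :: PySem.Chars.splitOn rest' ['-'] := by
          conv_lhs => rw [hpart, hp0]
          exact splitOn_dash [] rest' (by simp)
        unfold pyA_part pyB_part pyB_scanPart
        rw [hB, if_neg hpe, if_pos (isIn_dash_true part (by rw [hpart]; simp)),
          if_pos (by rw [hsp]; simp)]
        rfl
      · have hscan2 : pyB_scan part none [] = pyB_scan rest' (some pre) [] := by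
          rw [hscan]
          simp only [pyB_scan]
          rw [if_neg (by decide), if_pos ⟨by trivial, by trivial, hp0⟩]
        rcases hrest2 : rest'.dropWhile PySem.Chars.isdigit with _ | ⟨d, rest3⟩
        · -- rest' is all digits
          have hsplit2 : rest'.takeWhile PySem.Chars.isdigit = rest' := by
            have := List.takeWhile_append_dropWhile (p := PySem.Chars.isdigit) (l := rest')
            rw [hrest2, List.append_nil] at this
            exact this
          have hall2 : ∀ x ∈ rest', PySem.Chars.isdigit x = true :=
            fun x hx => List.mem_takeWhile_imp (by rw [hsplit2]; exact hx)
          have hnd2 : '-' ∉ rest' := fun hm => absurd (hall2 '-' hm) (by decide)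
          have hsp : PySem.Chars.splitOn part ['-'] = [pre, rest'] := by
            conv_lhs => rw [hpart]
            rw [splitOn_dash pre rest' hnd_pre, splitOn_no_dash rest' hnd2]
          by_cases hr0 : rest' = []
          · have hB : pyB_scan part none [] = none := by
              rw [hscan2, hr0]
              simp [pyB_scan]
            unfold pyA_part pyB_part pyB_scanPart
            rw [hB, if_neg hpe, if_pos (isIn_dash_true part (by rw [hpart]; simp)),
              if_pos (by rw [hsp]; simp [hr0])]
            rfl
          · have hB : pyB_scan part none [] = some (some pre, rest') := by
              rw [hscan2]
              have h1 := scan_digits rest' hall2 [] (some pre) []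
              rw [List.append_nil] at h1
              rw [h1]
              simp [pyB_scan, hr0]
            unfold pyA_part pyB_part pyB_scanPart
            rw [hB, if_neg hpe, if_pos (isIn_dash_true part (by rw [hpart]; simp)),
              if_neg (by rw [hsp]; simp [hp0, hr0]),
              if_neg (by rw [hsp]; simp [strIsdigit_true pre hp0 hpredig, strIsdigit_true rest' hr0 hall2])]
            rw [hsp]
            simp only [List.getD_cons_zero, List.getD_cons_succ]
            rcases hoc1 : PySem.Int.ofChars? pre with _ | lo
            · simp [hoc1]
            · rcases hoc2 : PySem.Int.ofChars? rest' with _ | hi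
              · simp [hoc1, hoc2]
              · simp only [hoc1, hoc2]
                by_cases h1 : lo > hi
                · rw [if_pos h1, if_pos (show lo > hi ∨ lo < 1 ∨ hi > max_idx from Or.inl h1)]
                  rfl
                · by_cases h2 : lo < 1 ∨ hi > max_idx
                  · rw [if_neg h1, if_pos h2, if_pos (show lo > hi ∨ lo < 1 ∨ hi > max_idx by tauto)]
                    rfl
                  · rw [if_neg h1, if_neg h2, if_neg (show ¬(lo > hi ∨ lo < 1 ∨ hi > max_idx) by tauto)]
                    rfl
        · -- rest' contains a non-digit d after its digit prefix
          have hpart2 : rest' = rest'.takeWhile PySem.Chars.isdigit ++ d :: rest3 := by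
            conv_lhs => rw [← List.takeWhile_append_dropWhile (p := PySem.Chars.isdigit) (l := rest')]
            rw [hrest2]
          have hdd : PySem.Chars.isdigit d = false := by
            have w : rest'.dropWhile PySem.Chars.isdigit ≠ [] := by rw [hrest2]; simp
            have := List.head_dropWhile_not PySem.Chars.isdigit w
            simp only [hrest2, List.head_cons] at this
            exact this
          have hB : pyB_scan part none [] = none := by
            rw [hscan2]
            conv_lhs => rw [hpart2]
            rw [scan_digits (rest'.takeWhile PySem.Chars.isdigit)
              (fun x hx => List.mem_takeWhile_imp hx) (d :: rest3) (some pre) []]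
            simp only [pyB_scan, List.nil_append]
            rw [if_neg (isdigit_false_cond d hdd), if_neg (by simp)]
          have hA : pyA_part max_idx S part = none := by
            by_cases hdm : '-' ∈ rest'
            · obtain ⟨Q, R, hQR, hQnd⟩ := first_dash_split rest' hdm
              have hsp : PySem.Chars.splitOn part ['-'] = pre :: Q :: PySem.Chars.splitOn R ['-'] := by
                conv_lhs => rw [hpart, hQR]
                rw [splitOn_dash pre (Q ++ '-' :: R) hnd_pre, splitOn_dash Q R hQnd]
              have hlen : (PySem.Chars.splitOn part ['-']).length ≠ 2 := by
                rw [hsp]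
                simp only [List.length_cons]
                have := splitOn_ne_nil R
                have : (PySem.Chars.splitOn R ['-']).length ≠ 0 := by
                  simpa [List.length_eq_zero_iff] using this
                omega
              unfold pyA_part
              rw [if_neg hpe, if_pos (isIn_dash_true part (by rw [hpart]; simp)), if_pos (Or.inl hlen)]
            · have hsp : PySem.Chars.splitOn part ['-'] = [pre, rest'] := by
                conv_lhs => rw [hpart]
                rw [splitOn_dash pre rest' hnd_pre, splitOn_no_dash rest' hdm]
              have hdr : d ∈ rest' := by rw [hpart2]; simp
              unfold pyA_part
              rw [if_neg hpe, if_pos (isIn_dash_true part (by rw [hpart]; simp)),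
                if_neg (by rw [hsp]; simp [hp0, fun h => List.ne_nil_of_mem hdr h]),
                if_pos (by rw [hsp]; simp [strIsdigit_false rest' d hdr hdd])]
          rw [hA]
          unfold pyB_part pyB_scanPart
          rw [hB]
          rfl
    · -- c is neither a digit nor '-'
      have hB : pyB_scan part none [] = none := by
        rw [hscan]
        simp only [pyB_scan]
        rw [if_neg hcond, if_neg (fun h => hc h.1)]
      have hA : pyA_part max_idx S part = none := by
        by_cases hdm : '-' ∈ part
        · have hdm' : '-' ∈ rest' := by
            rcases (List.mem_append.1 (by rw [hpart] at hdm; exact hdm)) with h | h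
            · exact absurd h hnd_pre
            · rcases List.mem_cons.1 h with h | h
              · exact absurd h.symm hc
              · exact h
          obtain ⟨Q, R, hQR, hQnd⟩ := first_dash_split rest' hdm'
          have hpart3 : part = (pre ++ c :: Q) ++ '-' :: R := by
            rw [hpart, hQR]
            simp
          have hnp : '-' ∉ pre ++ c :: Q := by
            intro hm
            rcases List.mem_append.1 hm with h | h
            · exact hnd_pre h
            · rcases List.mem_cons.1 h with h | h
              · exact hc h.symm
              · exact hQnd h
          have hsp : PySem.Chars.splitOn part ['-'] = (pre ++ c :: Q) :: PySem.Chars.splitOn R ['-'] := by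
            conv_lhs => rw [hpart3]
            exact splitOn_dash (pre ++ c :: Q) R hnp
          unfold pyA_part
          rw [if_neg hpe, if_pos (isIn_dash_true part hdm)]
          by_cases hfirst : (PySem.Chars.splitOn part ['-']).length ≠ 2 ∨
              (PySem.Chars.splitOn part ['-']).getD 0 [] = [] ∨ (PySem.Chars.splitOn part ['-']).getD 1 [] = []
          · rw [if_pos hfirst]
          · rw [if_neg hfirst,
              if_pos (by rw [hsp]; simp [strIsdigit_false (pre ++ c :: Q) c (by simp) hcd])]
        · unfold pyA_part
          rw [if_neg hpe, if_neg (by simp [isIn_dash_false part hdm]),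
            if_pos (by simp [strIsdigit_false part c (by rw [hpart]; simp) hcd])]
      rw [hA]
      unfold pyB_part pyB_scanPart
      rw [hB]
      rfl

-- every interval B collects is valid: 1 ≤ lo ≤ hi ≤ max_idx
theorem pyB_part_valid (max_idx : Int) (part : List Char) (lo hi : Int)
    (h : pyB_part max_idx part = some (lo, hi)) : 1 ≤ lo ∧ lo ≤ hi ∧ hi ≤ max_idx := by
  unfold pyB_part at h
  rcases hp : pyB_scanPart part with _ | ⟨a, b⟩ <;> rw [hp] at h <;> dsimp only at h
  · cases h
  · split_ifs at h with h1
    cases h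
    push_neg at h1
    omega

theorem pyB_collect_append (max_idx : Int) (parts : List (List Char)) (acc : List (Int × Int)) :
    pyB_collect max_idx parts acc = (pyB_collect max_idx parts []).map (acc ++ ·) := by
  induction parts generalizing acc with
  | nil => simp [pyB_collect]
  | cons p rest ih =>
    simp only [pyB_collect]
    rcases pyB_part max_idx p with _ | iv <;> dsimp only
    · rfl
    · rw [ih (acc ++ [iv]), ih ([] ++ [iv])]
      rcases pyB_collect max_idx rest [] with _ | l <;> simp

-- A's loop computes exactly the union of B's collected intervals
theorem loopAB (max_idx : Int) (parts : List (List Char)) (S : PySem.Set Int) :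
    pyA_loop max_idx parts S
      = (pyB_collect max_idx parts []).map
          (fun ivs => ivs.foldl (fun T iv => PySem.Set.update T (PySem.List.pyRange iv.1 (iv.2 + 1) 1)) S) := by
  induction parts generalizing S with
  | nil => rfl
  | cons p rest ih =>
    simp only [pyA_loop, pyB_collect, partAB]
    rcases pyB_part max_idx p with _ | iv <;> dsimp only
    · rfl
    · simp only [Option.map_some]
      rw [ih, pyB_collect_append max_idx rest ([] ++ [iv]), Option.map_map]
      rcases pyB_collect max_idx rest [] with _ | l <;> simp

theorem pyB_collect_valid (max_idx : Int) (parts : List (List Char)) (acc ivs : List (Int × Int))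
    (hacc : ∀ iv ∈ acc, 1 ≤ iv.1 ∧ iv.1 ≤ iv.2 ∧ iv.2 ≤ max_idx)
    (h : pyB_collect max_idx parts acc = some ivs) :
    ∀ iv ∈ ivs, 1 ≤ iv.1 ∧ iv.1 ≤ iv.2 ∧ iv.2 ≤ max_idx := by
  induction parts generalizing acc with
  | nil => simp only [pyB_collect, Option.some.injEq] at h; subst h; exact hacc
  | cons p rest ih =>
    simp only [pyB_collect] at h
    rcases hp : pyB_part max_idx p with _ | ⟨lo, hi⟩ <;> rw [hp] at h
    · exact absurd h (by simp)
    · refine ih (acc ++ [(lo, hi)]) ?_ h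
      intro iv hiv
      rcases List.mem_append.1 hiv with h' | h'
      · exact hacc iv h'
      · rcases List.mem_singleton.1 h'
        exact pyB_part_valid max_idx p lo hi hp

-- membership in A's accumulated set
theorem mem_foldl_update (ivs : List (Int × Int)) (S : PySem.Set Int) (x : Int) :
    x ∈ ivs.foldl (fun T iv => PySem.Set.update T (PySem.List.pyRange iv.1 (iv.2 + 1) 1)) S
      ↔ x ∈ S ∨ ∃ iv ∈ ivs, iv.1 ≤ x ∧ x ≤ iv.2 := by
  induction ivs generalizing S with
  | nil => simp
  | cons iv rest ih =>
    simp only [List.foldl_cons, ih, PySem.Set.mem_update, PySem.List.mem_pyRange_one, List.mem_cons]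
    constructor
    · rintro ((h | h) | h)
      · exact Or.inl h
      · exact Or.inr ⟨iv, Or.inl rfl, h.1, by omega⟩
      · rcases h with ⟨jv, hj, hb⟩; exact Or.inr ⟨jv, Or.inr hj, hb⟩
    · rintro (h | ⟨jv, hj | hj, hb⟩)
      · exact Or.inl (Or.inl h)
      · subst hj; exact Or.inl (Or.inr ⟨hb.1, by omega⟩)
      · exact Or.inr ⟨jv, hj, hb⟩

theorem nodup_foldl_update (ivs : List (Int × Int)) (S : PySem.Set Int) (hS : S.Nodup) :
    (ivs.foldl (fun T iv => PySem.Set.update T (PySem.List.pyRange iv.1 (iv.2 + 1) 1)) S).Nodup := by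
  induction ivs generalizing S with
  | nil => exact hS
  | cons iv rest ih => exact ih _ (PySem.Set.nodup_update _ _ hS)

-- the recursive form of B's sweep loop
def sweepRec : Int → List (Int × Int) → List Int
  | _, [] => []
  | cur, iv :: rest => PySem.List.pyRange (max iv.1 (cur + 1)) (iv.2 + 1) 1 ++ sweepRec (max cur iv.2) rest

theorem pyB_sweep_eq (ivs : List (Int × Int)) (out : List Int) (cur : Int) :
    ivs.foldl (fun st iv => (st.1 ++ PySem.List.pyRange (max iv.1 (st.2 + 1)) (iv.2 + 1) 1, max st.2 iv.2)) (out, cur)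
      = (out ++ sweepRec cur ivs, ivs.foldl (fun c iv => max c iv.2) cur) := by
  induction ivs generalizing out cur with
  | nil => simp [sweepRec]
  | cons iv rest ih => simp [sweepRec, List.foldl_cons, ih]

-- the sweep of a list sorted by lower bound: strictly increasing, covering exactly the union above cur
theorem sweepRec_spec (ivs : List (Int × Int)) (cur : Int)
    (hs : ivs.Pairwise (fun p q => p.1 ≤ q.1)) :
    (sweepRec cur ivs).Pairwise (· < ·)
      ∧ ∀ x, x ∈ sweepRec cur ivs ↔ cur < x ∧ ∃ iv ∈ ivs, iv.1 ≤ x ∧ x ≤ iv.2 := by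
  induction ivs generalizing cur with
  | nil => simp [sweepRec]
  | cons iv rest ih =>
    rcases List.pairwise_cons.1 hs with ⟨hlo, hrest⟩
    rcases ih (max cur iv.2) hrest with ⟨ihp, ihm⟩
    constructor
    · rw [sweepRec, List.pairwise_append]
      refine ⟨PySem.List.pairwise_lt_pyRange_one _ _, ihp, ?_⟩
      intro a ha b hb
      rcases PySem.List.mem_pyRange_one.1 ha with ⟨_, ha2⟩
      rcases (ihm b).1 hb with ⟨hb1, _⟩
      omega
    · intro x
      rw [sweepRec, List.mem_append, PySem.List.mem_pyRange_one, ihm]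
      constructor
      · rintro (⟨hx1, hx2⟩ | ⟨h1, jv, hj, hb⟩)
        · exact ⟨by omega, iv, List.mem_cons_self, by omega, by omega⟩
        · exact ⟨by omega, jv, List.mem_cons_of_mem _ hj, hb⟩
      · rintro ⟨hc, jv, hjmem, hb⟩
        rcases List.mem_cons.1 hjmem with hj | hj
        · subst hj; exact Or.inl ⟨by omega, by omega⟩
        · by_cases hx : max cur iv.2 < x
          · exact Or.inr ⟨hx, jv, hj, hb⟩
          · have hll : iv.1 ≤ jv.1 := hlo jv hj
            exact Or.inl ⟨by omega, by omega⟩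

-- ===== VERDICT (by name: the statement is the Claim_ definition above) =====
theorem parse_idx_notation_spec : Claim_equal_parse_idx_notation := by
  unfold Claim_equal_parse_idx_notation Spec_parse_idx_notation
  intro raw max_idx _
  unfold parse_idx_notation parse_idx_notation_alt
  by_cases hs : PySem.Chars.strip raw.toList = []
  · rw [if_pos (Or.inr hs), if_pos hs]
  · have hfil := filter_ne_nil_of_strip raw.toList hs
    have hrep : PySem.Chars.replace raw.toList [' '] [] ≠ [] := by
      rw [replace_space]; exact hfil
    have hraw : raw.toList ≠ [] := by
      intro h; apply hs; rw [h]; rfl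
    rw [if_neg (by push_neg; exact ⟨hraw, hs⟩), if_neg hs, if_neg hrep]
    rw [loopAB]
    rcases hc : pyB_collect max_idx (PySem.Chars.splitOn (PySem.Chars.replace raw.toList [' '] []) [',']) [] with _ | ivs
    · rfl
    · simp only [Option.map_some]
      have hval := pyB_collect_valid max_idx _ [] ivs (by simp) hc
      have hperm : (PySem.List.sorted ivs (fun iv => iv.1) false).Perm ivs := PySem.List.sorted_perm ivs (fun iv => iv.1) false
      have hpair : (PySem.List.sorted ivs (fun iv => iv.1) false).Pairwise (fun p q => p.1 ≤ q.1) :=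
        PySem.List.sorted_pairwise ivs (fun iv => iv.1)
      obtain ⟨hswp, hswm⟩ := sweepRec_spec (PySem.List.sorted ivs (fun iv => iv.1) false) 0 hpair
      have hout : (pyB_sweep (PySem.List.sorted ivs (fun iv => iv.1) false)).1
          = sweepRec 0 (PySem.List.sorted ivs (fun iv => iv.1) false) := by
        rw [pyB_sweep, pyB_sweep_eq]; rfl
      have hmem : ∀ x, x ∈ sweepRec 0 (PySem.List.sorted ivs (fun iv => iv.1) false)
          ↔ x ∈ ivs.foldl (fun T iv => PySem.Set.update T (PySem.List.pyRange iv.1 (iv.2 + 1) 1)) PySem.Set.empty := by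
        intro x
        rw [hswm, mem_foldl_update]
        constructor
        · rintro ⟨h0, jv, hj, hb⟩
          exact Or.inr ⟨jv, hperm.subset hj, hb⟩
        · rintro (h | ⟨jv, hj, hb⟩)
          · exact absurd h List.not_mem_nil
          · have := hval jv hj
            exact ⟨by omega, jv, hperm.mem_iff.2 hj, hb⟩
      rw [hout]
      by_cases hSe : ivs.foldl (fun T iv => PySem.Set.update T (PySem.List.pyRange iv.1 (iv.2 + 1) 1)) PySem.Set.empty = []
      · have he : sweepRec 0 (PySem.List.sorted ivs (fun iv => iv.1) false) = [] := by
          rw [List.eq_nil_iff_forall_not_mem]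
          intro x hx
          have hx' := (hmem x).1 hx; rw [hSe] at hx'; exact List.not_mem_nil hx'
        rw [if_pos hSe, if_pos he]
      · have hne : sweepRec 0 (PySem.List.sorted ivs (fun iv => iv.1) false) ≠ [] := by
          intro he
          apply hSe
          rw [List.eq_nil_iff_forall_not_mem]
          intro x hx
          have hx' : x ∈ sweepRec 0 (PySem.List.sorted ivs (fun iv => iv.1) false) := (hmem x).2 hx
          rw [he] at hx'
          exact List.not_mem_nil hx'
        rw [if_neg hSe, if_neg hne]
        congr 1
        refine PySem.List.sorted_eq_of_perm_of_pairwise_lt _ _ _ ?_ hswp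
        refine (List.perm_ext_iff_of_nodup (hswp.imp ne_of_lt) (nodup_foldl_update ivs PySem.Set.empty (List.nodup_nil))).2 ?_
        exact hmem
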